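-- pv_equiv track=rewrite | github.com/TencentCloudADP/youtu-rag | utu/rag/knowledge_builder/chunk_processor.py | check_answer_point
-- ===== SOURCE A (Python) =====
-- def check_answer_point(first_level_points, start_idx, end_idx):
--     if len(first_level_points) > 0 and first_level_points[0] < start_idx:
--         return False
--     for idx in range(1, len(first_level_points)):
--         p = first_level_points[idx]
--         if p <= first_level_points[idx-1] or p > end_idx:
--             return False
--     return True
-- ===== SOURCE B (Python) =====
-- def check_answer_point(first_level_points, start_idx, end_idx):
--     if not first_level_points:
--         return True
--     if first_level_points[0] < start_idx:
--         return False
--     tail = first_level_points[1:]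
--     if tail and max(tail) > end_idx:
--         return False
--     return (first_level_points == sorted(first_level_points)
--             and len(set(first_level_points)) == len(first_level_points))
-- ===== Notes on version B (the rewrite author's own statement) =====
-- stated objective: alternative
-- what changed: Replaces A's single fused adjacent-comparison loop with a max()-based upper-bound check on the tail plus a sortedness test by comparing the list with sorted(list) and a distinctness test via len(set(list)); no adjacent-pair scan remains.
import Mathlib
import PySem

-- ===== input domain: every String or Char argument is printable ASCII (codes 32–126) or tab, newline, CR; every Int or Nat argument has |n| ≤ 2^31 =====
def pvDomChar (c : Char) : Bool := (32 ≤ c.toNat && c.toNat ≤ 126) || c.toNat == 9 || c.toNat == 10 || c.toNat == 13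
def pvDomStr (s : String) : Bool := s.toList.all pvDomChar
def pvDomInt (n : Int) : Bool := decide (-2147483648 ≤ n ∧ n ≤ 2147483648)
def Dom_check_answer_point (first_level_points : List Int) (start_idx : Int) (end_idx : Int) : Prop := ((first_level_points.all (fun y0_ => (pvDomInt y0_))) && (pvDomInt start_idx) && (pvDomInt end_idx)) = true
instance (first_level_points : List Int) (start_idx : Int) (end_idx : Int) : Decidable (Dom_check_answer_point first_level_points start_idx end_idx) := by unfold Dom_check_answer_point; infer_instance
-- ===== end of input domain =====

-- B replaces A's single fused adjacent-comparison loop with a max()-based tail upper-bound check plus a sortedness test (list == sorted(list)) and a distinctness test (len(set(list)) == len(list)); alternative decomposition.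


-- ===== PORT A =====
-- the 'for idx in range(1, len(xs))' loop with its early 'return False'
def checkLoopA (xs : List Int) (end_idx : Int) (idx : Nat) : Bool :=
  if h : idx < xs.length then
    let p := xs[idx]
    if p ≤ xs[idx - 1]! ∨ end_idx < p then false
    else checkLoopA xs end_idx (idx + 1)
  else true
termination_by xs.length - idx

def check_answer_point (first_level_points : List Int) (start_idx : Int) (end_idx : Int) : Bool :=
  if 0 < first_level_points.length ∧ first_level_points[0]! < start_idx then false
  else checkLoopA first_level_points end_idx 1

-- ===== PORT B =====
-- 'tail = xs[1:]' on a nonempty list is exactly its tail (exact);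
-- 'max(tail)' is PySem.List.max?; 'sorted(xs)' is PySem.List.sorted; 'set(xs)' is PySem.Set.ofList.
def check_answer_point_alt (first_level_points : List Int) (start_idx : Int) (end_idx : Int) : Bool :=
  match first_level_points with
  | [] => true
  | x :: tail =>
    if x < start_idx then false
    else if !tail.isEmpty &&
            ((PySem.List.max? tail (fun y => y)).elim false (fun m => decide (end_idx < m))) then false
    else decide (first_level_points = PySem.List.sorted first_level_points (fun y => y) false)
         && decide ((PySem.Set.ofList first_level_points).length = first_level_points.length)

-- ===== PRECONDITION & SPEC =====
def Spec_check_answer_point (first_level_points : List Int) (start_idx : Int) (end_idx : Int) (out : Bool) : Prop := out = check_answer_point_alt first_level_points start_idx end_idx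
instance (first_level_points : List Int) (start_idx : Int) (end_idx : Int) (out : Bool) : Decidable (Spec_check_answer_point first_level_points start_idx end_idx out) := by unfold Spec_check_answer_point; infer_instance

-- ===== CLAIM (what is proved, stated in full; the proofs are below) =====
def Claim_equal_check_answer_point : Prop := ∀ (first_level_points : List Int) (start_idx : Int) (end_idx : Int), Dom_check_answer_point first_level_points start_idx end_idx → Spec_check_answer_point first_level_points start_idx end_idx (check_answer_point first_level_points start_idx end_idx)

-- ===== LEMMAS AND PROOFS =====
-- A's loop, started with 'pre' already scanned and suffix a :: rest ahead, equals the
-- fused pair-check on the suffix.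
lemma checkLoopA_eq (e : Int) : ∀ (rest : List Int) (pre : List Int) (a : Int),
    checkLoopA (pre ++ a :: rest) e (pre.length + 1)
      = ((a :: rest).zip rest).all (fun ab => decide (ab.1 < ab.2) && decide (ab.2 ≤ e)) := by
  intro rest
  induction rest with
  | nil =>
      intro pre a
      rw [checkLoopA]
      rw [dif_neg (by simp)]
      simp
  | cons b rest' ih =>
      intro pre a
      rw [checkLoopA]
      have hlen : pre.length + 1 < (pre ++ a :: b :: rest').length := by
        simp
      have hgetb : (pre ++ a :: b :: rest')[pre.length + 1]'hlen = b := by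
        rw [List.getElem_append_right] <;> simp
      have hgeta : (pre ++ a :: b :: rest')[pre.length + 1 - 1]! = a := by
        rw [show pre.length + 1 - 1 = pre.length from rfl,
            List.getElem!_eq_getElem?_getD]
        simp
      rw [dif_pos hlen]
      simp only [hgetb, hgeta]
      by_cases hc : b ≤ a ∨ e < b
      · rw [if_pos hc]
        have hf : (decide (a < b) && decide (b ≤ e)) = false := by
          simp only [Bool.and_eq_false_iff, decide_eq_false_iff_not]
          omega
        simp [hf]
      · rw [if_neg hc]
        push Not at hc
        have heq : pre ++ a :: b :: rest' = (pre ++ [a]) ++ b :: rest' := by simp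
        have hlen2 : pre.length + 1 + 1 = (pre ++ [a]).length + 1 := by simp
        rw [heq, hlen2, ih (pre ++ [a]) b]
        simp only [List.zip_cons_cons, List.all_cons]
        have h1 : decide (a < b) = true := by simp; omega
        have h2 : decide (b ≤ e) = true := by simp; omega
        simp [h1, h2]

-- the fused adjacent pair-check is Pairwise (<) together with the tail upper bound
lemma pair_iff_pairwise (x : Int) (t : List Int) :
    (((x :: t).zip t).all (fun ab => decide (ab.1 < ab.2)) = true) ↔ List.Pairwise (· < ·) (x :: t) := by
  induction t generalizing x with
  | nil => simp
  | cons b t' ih =>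
      simp only [List.zip_cons_cons, List.all_cons, Bool.and_eq_true, decide_eq_true_eq,
        ih b, List.pairwise_cons]
      constructor
      · rintro ⟨hxb, hp⟩
        refine ⟨fun y hy => ?_, hp⟩
        rcases List.mem_cons.mp hy with rfl | hy'
        · exact hxb
        · exact lt_trans hxb (hp.1 y hy')
      · rintro ⟨hall, hp⟩
        exact ⟨hall b (by simp), hp⟩

lemma all_pair_split (e : Int) (x : Int) (t : List Int) :
    (((x :: t).zip t).all (fun ab => decide (ab.1 < ab.2) && decide (ab.2 ≤ e)))
      = (t.all (fun p => decide (p ≤ e)) && ((x :: t).zip t).all (fun ab => decide (ab.1 < ab.2))) := by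
  induction t generalizing x with
  | nil => simp
  | cons b t' ih =>
      simp only [List.zip_cons_cons, List.all_cons, ih b]
      by_cases h1 : x < b <;> by_cases h2 : b ≤ e <;> simp [h1, h2]

-- B's sortedness test: xs == sorted(xs)  ⟺  xs is pairwise ≤
lemma sorted_eq_iff_pairwise (xs : List Int) :
    (xs = PySem.List.sorted xs (fun y => y) false) ↔ List.Pairwise (· ≤ ·) xs := by
  constructor
  · intro h
    have := PySem.List.sorted_pairwise (xs := xs) (key := fun y => y)
    rw [← h] at this
    exact this
  · intro h
    exact (PySem.List.sorted_eq_self_of_pairwise xs (fun y => y) h).symm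

-- B's distinctness test: len(set(xs)) == len(xs)  ⟺  xs has no duplicates
lemma setlen_eq_iff_nodup (xs : List Int) :
    ((PySem.Set.ofList xs).length = xs.length) ↔ xs.Nodup := by
  have hfin : (PySem.Set.ofList xs).toFinset = xs.toFinset := by
    ext a; simp [List.mem_toFinset, PySem.Set.mem_ofList]
  have hlen : (PySem.Set.ofList xs).length = xs.toFinset.card := by
    rw [← hfin, List.toFinset_card_of_nodup (PySem.Set.nodup_ofList xs)]
  rw [hlen]
  constructor
  · intro h
    exact Multiset.toFinset_card_eq_card_iff_nodup.mp (by simpa using h)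
  · intro h
    exact List.toFinset_card_of_nodup h

-- pairwise < splits into pairwise ≤ and nodup
lemma pairwise_lt_iff (xs : List Int) :
    List.Pairwise (· < ·) xs ↔ (List.Pairwise (· ≤ ·) xs ∧ xs.Nodup) := by
  constructor
  · intro h
    exact ⟨h.imp (fun hab => le_of_lt hab), h.imp (fun hab => ne_of_lt hab)⟩
  · rintro ⟨h1, h2⟩
    exact (h1.and h2).imp (fun ⟨hle, hne⟩ => lt_of_le_of_ne hle hne)

-- ===== VERDICT (by name: the statement is the Claim_ definition above) =====
theorem check_answer_point_spec : Claim_equal_check_answer_point := by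
  intro xs s e _
  unfold Spec_check_answer_point check_answer_point
  match xs with
  | [] =>
      rw [if_neg (by simp)]
      rw [checkLoopA]
      simp [check_answer_point_alt]
  | x :: t =>
      have hloop : checkLoopA (x :: t) e 1
          = ((x :: t).zip t).all (fun ab => decide (ab.1 < ab.2) && decide (ab.2 ≤ e)) := by
        have := checkLoopA_eq e t [] x
        simpa using this
      simp only [check_answer_point_alt]
      by_cases hx : x < s
      · rw [if_pos ⟨by simp, by simpa using hx⟩]
        rw [if_pos hx]
      · rw [if_neg (by simp; omega)]
        rw [if_neg hx]
        rw [hloop, all_pair_split]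
        -- tail upper bound: the Python 'tail and max(tail) > end_idx' test is the negation of t.all (≤ e)
        have hmax : (!t.isEmpty &&
            ((PySem.List.max? t (fun y => y)).elim false (fun m => decide (e < m))))
            = !(t.all (fun p => decide (p ≤ e))) := by
          match t with
          | [] => simp
          | b :: t' =>
              obtain ⟨m, hm⟩ : ∃ m, PySem.List.max? (b :: t') (fun y => y) = some m :=
                ⟨t'.foldl max b, PySem.List.max?_id_cons b t'⟩
              have hmem := PySem.List.max?_mem hm
              have hismax := PySem.List.max?_isMax hm
              simp only [hm, Option.elim, List.isEmpty_cons, Bool.not_false, Bool.true_and]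
              have hiff : (e < m) ↔ ¬ (((b :: t').all (fun p => decide (p ≤ e))) = true) := by
                constructor
                · intro hem hall
                  have := (List.all_eq_true.mp hall) m hmem
                  simp at this; omega
                · intro hall
                  have hex : ∃ p ∈ b :: t', ¬ (p : Int) ≤ e := by
                    by_contra hno
                    push Not at hno
                    exact hall (List.all_eq_true.mpr (fun p hp => by
                      simpa using hno p hp))
                  obtain ⟨p, hp, hpe⟩ := hex
                  have := hismax p hp
                  simp at this; omega
              cases hall : ((b :: t').all (fun p => decide (p ≤ e))) with
              | true =>
                  have hnl : ¬ e < m := fun h => (hiff.mp h) hall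
                  simp [hnl]
              | false =>
                  have hl : e < m := hiff.mpr (by simp [hall])
                  simp [hl]
        by_cases hb : (t.all (fun p => decide (p ≤ e))) = true
        · rw [if_neg (by simp [hmax, hb])]
          rw [hb, Bool.true_and]
          have hiff : (((x :: t).zip t).all (fun ab => decide (ab.1 < ab.2)) = true)
              ↔ ((decide ((x :: t) = PySem.List.sorted (x :: t) (fun y => y) false)
                  && decide ((PySem.Set.ofList (x :: t)).length = (x :: t).length)) = true) := by
            rw [pair_iff_pairwise, pairwise_lt_iff]
            simp only [Bool.and_eq_true, decide_eq_true_eq]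
            rw [sorted_eq_iff_pairwise, setlen_eq_iff_nodup]
          cases hz : ((x :: t).zip t).all (fun ab => decide (ab.1 < ab.2)) with
          | true => exact (hiff.mp hz).symm
          | false =>
              cases hw : (decide ((x :: t) = PySem.List.sorted (x :: t) (fun y => y) false)
                  && decide ((PySem.Set.ofList (x :: t)).length = (x :: t).length)) with
              | true => exact absurd (hiff.mpr hw) (by simp [hz])
              | false => rfl
        · rw [if_pos (by simp [hmax, hb])]
          simp [Bool.eq_false_iff.mpr hb]
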